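-- pv_equiv track=rewrite | github.com/lucassdvieira/bsi-exercises | bsi2/programacaoII/fixacao3-lucasdavid.py | soma_maluca
-- ===== SOURCE A (Python) =====
-- def soma_maluca(a, b, c):
--     """
--     Some os números inteiros a, b, e c
--     Se algum número aparecer repetido ele não conta na soma
--     soma_maluca(1, 2, 3) -> 6
--     soma_maluca(3, 2, 3) -> 2
--     soma_maluca(3, 3, 3) -> 0
--     """
--     numsFormatted = []
--     for i in [a,b,c]:
--       numsVariable = [a,b,c]
--       numsVariable.remove(i)
--       if i not in numsVariable:
--         numsFormatted.append(i)
--     return sum(numsFormatted)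
-- ===== SOURCE B (Python) =====
-- def soma_maluca(a, b, c):
--     counts = {}
--     for v in (a, b, c):
--         counts[v] = counts.get(v, 0) + 1
--     return sum(v for v, n in counts.items() if n == 1)
-- ===== Notes on version B (the rewrite author's own statement) =====
-- stated objective: idiomatic
-- what changed: Replaces the three rebuild-the-list/remove/membership passes with a single count-then-filter pass: build a frequency dict over (a,b,c) once, then sum the keys whose count is exactly 1.
import Mathlib
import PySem

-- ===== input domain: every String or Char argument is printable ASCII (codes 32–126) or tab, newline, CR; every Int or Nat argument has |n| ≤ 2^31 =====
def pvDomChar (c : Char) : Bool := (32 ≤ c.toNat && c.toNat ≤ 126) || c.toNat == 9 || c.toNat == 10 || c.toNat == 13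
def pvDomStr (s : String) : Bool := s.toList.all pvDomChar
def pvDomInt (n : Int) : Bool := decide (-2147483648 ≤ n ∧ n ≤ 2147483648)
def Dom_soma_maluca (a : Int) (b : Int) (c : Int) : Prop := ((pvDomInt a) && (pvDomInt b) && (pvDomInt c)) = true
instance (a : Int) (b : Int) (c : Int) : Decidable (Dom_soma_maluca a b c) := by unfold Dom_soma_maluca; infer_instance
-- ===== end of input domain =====

-- B replaces A's per-element list-rebuild/remove/membership loop with one counting pass
-- (frequency dict, then sum keys of count 1); idiomatic, same result.

-- ===== PORT A =====
def soma_maluca (a : Int) (b : Int) (c : Int) : Int :=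
  let numsFormatted := [a, b, c].foldl (fun acc i =>
    let numsVariable := [a, b, c]
    match PySem.List.remove? numsVariable i with
    | some nv => if i ∈ nv then acc else acc ++ [i]
    | none => acc   -- unreachable: i is drawn from [a,b,c], so remove? succeeds
  ) []
  numsFormatted.sum

-- ===== PORT B =====
def soma_maluca_alt (a : Int) (b : Int) (c : Int) : Int :=
  let counts := [a, b, c].foldl (fun d v => d.insert v (d.getD v 0 + 1)) (PySem.Dict.empty)
  counts.items.foldl (fun s p => if p.2 == 1 then s + p.1 else s) 0

-- ===== PRECONDITION & SPEC =====
def Spec_soma_maluca (a : Int) (b : Int) (c : Int) (out : Int) : Prop := out = soma_maluca_alt a b c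
instance (a : Int) (b : Int) (c : Int) (out : Int) : Decidable (Spec_soma_maluca a b c out) := by unfold Spec_soma_maluca; infer_instance

-- ===== CLAIM (what is proved, stated in full; the proofs are below) =====
def Claim_equal_soma_maluca : Prop := ∀ (a : Int) (b : Int) (c : Int), Dom_soma_maluca a b c → Spec_soma_maluca a b c (soma_maluca a b c)

-- ===== LEMMAS AND PROOFS =====

-- ===== VERDICT (by name: the statement is the Claim_ definition above) =====
theorem soma_maluca_spec : Claim_equal_soma_maluca := by
  intro a b c _
  unfold Spec_soma_maluca soma_maluca soma_maluca_alt
  by_cases hab : a = b <;> by_cases hac : a = c <;> by_cases hbc : b = c <;>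
    subst_vars <;>
    simp_all [PySem.List.remove?_cons_self, PySem.List.remove?_cons_of_ne,
      PySem.Dict.items_insert, PySem.Dict.empty, PySem.Dict.contains,
      PySem.Dict.get?, PySem.Dict.getD, Ne.symm] <;>
    omega
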